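-- pv_equiv track=rewrite | github.com/ninadmehta34/Academicprojects | 1D_Finite_Element_Solver_Python/FEM_1D_Functions.py | generateMeshConnectivity
-- ===== SOURCE A (Python) =====
-- def generateMeshConnectivity(a_NumElements, a_Degree):
--
--     a_NumElements = int(a_NumElements)
--     connectivity = []
--     #a_NumElements = 10
--     element_type = a_Degree + 1
--     i = 0
--     while len(connectivity) < a_NumElements:
--         temp = []
--         while len(temp)<element_type:
--             temp.append(i)
--             if len(temp)!=element_type:
--                 i = i+1
--         connectivity.append(temp)
--     return connectivity
-- ===== SOURCE B (Python) =====
-- def generateMeshConnectivity(a_NumElements, a_Degree):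
--     return [[e * a_Degree + j for j in range(a_Degree + 1)]
--             for e in range(int(a_NumElements))]
-- ===== Notes on version B (the rewrite author's own statement) =====
-- stated objective: simpler
-- what changed: Replaces A's two nested while loops threading a shared mutable node counter i with a direct nested comprehension computing each element's nodes by the closed-form index e*a_Degree + j.
import Mathlib
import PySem

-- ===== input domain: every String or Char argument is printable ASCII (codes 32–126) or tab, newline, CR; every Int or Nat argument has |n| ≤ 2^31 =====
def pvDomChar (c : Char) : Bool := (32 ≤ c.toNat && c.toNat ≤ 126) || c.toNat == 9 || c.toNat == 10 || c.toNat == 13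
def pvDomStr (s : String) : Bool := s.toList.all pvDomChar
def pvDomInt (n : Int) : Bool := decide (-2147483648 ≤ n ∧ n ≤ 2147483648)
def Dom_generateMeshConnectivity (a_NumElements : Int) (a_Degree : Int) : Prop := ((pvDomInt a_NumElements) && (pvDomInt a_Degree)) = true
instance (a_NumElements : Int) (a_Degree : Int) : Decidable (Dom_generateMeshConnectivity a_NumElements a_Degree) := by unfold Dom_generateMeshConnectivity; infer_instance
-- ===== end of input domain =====

-- B replaces A's counter `i` threaded through two nested while loops by the closed-form node index e*a_Degree + j (objective: simpler).

-- ===== PORT A =====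
-- inner while loop of A: runs while len(temp) < element_type, i.e. exactly
-- (element_type.toNat - temp.length) more times; fuel counts those iterations.
def pvInnerA (et : Int) : Nat → List Int → Int → List Int × Int
  | 0, temp, i => (temp, i)
  | Nat.succ k, temp, i =>
      let temp' := temp ++ [i]
      let i' := if (temp'.length : Int) ≠ et then i + 1 else i
      pvInnerA et k temp' i'

-- outer while loop of A: runs while len(connectivity) < a_NumElements; fuel counts iterations.
def pvOuterA (et : Int) : Nat → List (List Int) → Int → List (List Int)
  | 0, conn, _ => conn
  | Nat.succ k, conn, i =>
      let r := pvInnerA et et.toNat [] i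
      pvOuterA et k (conn ++ [r.1]) r.2

def generateMeshConnectivity (a_NumElements : Int) (a_Degree : Int) : List (List Int) :=
  pvOuterA (a_Degree + 1) a_NumElements.toNat [] 0

-- ===== PORT B =====
def generateMeshConnectivity_alt (a_NumElements : Int) (a_Degree : Int) : List (List Int) :=
  (List.range a_NumElements.toNat).map (fun e : Nat =>
    (List.range (a_Degree + 1).toNat).map (fun j : Nat => (e : Int) * a_Degree + (j : Int)))

-- ===== PRECONDITION & SPEC =====
def Spec_generateMeshConnectivity (a_NumElements : Int) (a_Degree : Int) (out : List (List Int)) : Prop := out = generateMeshConnectivity_alt a_NumElements a_Degree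
instance (a_NumElements : Int) (a_Degree : Int) (out : List (List Int)) : Decidable (Spec_generateMeshConnectivity a_NumElements a_Degree out) := by unfold Spec_generateMeshConnectivity; infer_instance

-- ===== CLAIM (what is proved, stated in full; the proofs are below) =====
def Claim_equal_generateMeshConnectivity : Prop := ∀ (a_NumElements : Int) (a_Degree : Int), Dom_generateMeshConnectivity a_NumElements a_Degree → Spec_generateMeshConnectivity a_NumElements a_Degree (generateMeshConnectivity a_NumElements a_Degree)

-- ===== LEMMAS AND PROOFS =====

-- the inner loop returns temp extended by i, i+1, …, i+k-1, and leaves the counter at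
-- i + k - 1 (the last append does not increment), provided the fuel k matches et - len(temp).
theorem pvInnerA_eq (et : Int) :
    ∀ (k : Nat) (temp : List Int) (i : Int), (temp.length : Int) + k = et →
      pvInnerA et k temp i
        = (temp ++ (List.range k).map (fun j : Nat => i + (j : Int)),
           if k = 0 then i else i + k - 1) := by
  intro k
  induction k with
  | zero => intro temp i h; simp [pvInnerA]
  | succ k ih =>
      intro temp i h
      simp only [pvInnerA]
      by_cases hk : k = 0
      · subst hk
        have hne : ¬ (((temp ++ [i]).length : Int) ≠ et) := by
          simp only [List.length_append, List.length_cons, List.length_nil]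
          push_cast at h ⊢; omega
        rw [if_neg hne]
        simp [pvInnerA, List.range_succ]
      · have hne : ((temp ++ [i]).length : Int) ≠ et := by
          simp only [List.length_append, List.length_cons, List.length_nil]
          push_cast at h ⊢; omega
        rw [if_pos hne,
            ih (temp ++ [i]) (i + 1) (by simp only [List.length_append,
              List.length_cons, List.length_nil]; push_cast at h ⊢; omega)]
        simp only [Prod.mk.injEq]
        refine ⟨?_, ?_⟩
        · rw [List.append_assoc]
          congr 1
          have hr : (List.range (k + 1)).map (fun j : Nat => i + (j : Int))
              = i :: (List.range k).map (fun j : Nat => i + 1 + (j : Int)) := by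
            rw [List.range_succ_eq_map]
            simp only [List.map_cons, Nat.cast_zero, add_zero, List.map_map]
            congr 1
            apply List.map_congr_left
            intro j _
            simp only [Function.comp]
            push_cast; ring
          rw [hr]
          simp
        · rw [if_neg hk, if_neg (Nat.succ_ne_zero k)]
          push_cast; ring

-- the outer loop appends, for e = 0, …, k-1, the row starting at i + e*(et-1).
theorem pvOuterA_eq (et : Int) :
    ∀ (k : Nat) (conn : List (List Int)) (i : Int),
      pvOuterA et k conn i
        = conn ++ (List.range k).map (fun e : Nat =>
            (List.range et.toNat).map (fun j : Nat => i + (e : Int) * (et - 1) + (j : Int))) := by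
  intro k
  induction k with
  | zero => intro conn i; simp [pvOuterA]
  | succ k ih =>
      intro conn i
      simp only [pvOuterA]
      by_cases het : et ≤ 0
      · -- element_type ≤ 0: the inner loop runs zero times, every row is []
        have h0 : et.toNat = 0 := Int.toNat_of_nonpos het
        have hin : pvInnerA et et.toNat [] i = ([], i) := by
          rw [h0]; simp [pvInnerA]
        rw [hin, ih, List.append_assoc]
        congr 1
        rw [List.range_succ_eq_map]
        simp [h0, Function.comp_def]
      · -- element_type ≥ 1: the inner loop fills et nodes and leaves the counter at i + et - 1
        have hpos : 0 < et := lt_of_not_ge het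
        have hk0 : et.toNat ≠ 0 := by omega
        have hin := pvInnerA_eq et et.toNat [] i
          (by simp only [List.length_nil, Nat.cast_zero, zero_add]; omega)
        rw [hin]
        simp only [List.nil_append]
        rw [if_neg hk0, ih, List.append_assoc]
        congr 1
        rw [List.range_succ_eq_map, List.singleton_append]
        congr 1
        · apply List.map_congr_left; intro j _
          simp only [Nat.cast_zero, zero_mul, add_zero]
        · rw [List.map_map]
          apply List.map_congr_left; intro e _
          simp only [Function.comp]
          apply List.map_congr_left; intro j _
          have hcast : ((et.toNat : Int)) = et := by omega
          push_cast [hcast]; ring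

-- ===== VERDICT (by name: the statement is the Claim_ definition above) =====
theorem generateMeshConnectivity_spec : Claim_equal_generateMeshConnectivity := by
  intro n d _
  show generateMeshConnectivity n d = generateMeshConnectivity_alt n d
  unfold generateMeshConnectivity generateMeshConnectivity_alt
  rw [pvOuterA_eq]
  simp only [List.nil_append, add_sub_cancel_right]
  apply List.map_congr_left; intro e _
  apply List.map_congr_left; intro j _
  ring
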